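-- pv_equiv track=rewrite | github.com/heerucan/PS | 프로그래머스/unrated/120956. 옹알이 （1）/옹알이 （1）.py | solution
-- ===== SOURCE A (Python) =====
-- from itertools import permutations
--
-- def solution(babbling):
--     answer = 0
--     words = []
--     main = ["aya", "ye", "woo", "ma"]
--     for i in range(1,5):
--         for j in permutations(main, i):
--             words.append(''.join(j))
--
--     for i in babbling:
--         if i in words:
--             answer += 1
--     return answer
-- ===== SOURCE B (Python) =====
-- def solution(babbling):
--     tokens = ("aya", "ye", "woo", "ma")
--     count = 0
--     for word in babbling:
--         rest = word
--         used = []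
--         while rest:
--             for t in tokens:
--                 if t not in used and rest.startswith(t):
--                     used.append(t)
--                     rest = rest[len(t):]
--                     break
--             else:
--                 break
--         if not rest and used:
--             count += 1
--     return count
-- ===== Notes on version B (the rewrite author's own statement) =====
-- stated objective: alternative
-- what changed: A materialises all 60 joined permutations of the four tokens and tests each word by list membership; B never builds that list: it scans each word once with a greedy cursor over the four tokens and a used-token set (valid because the tokens start with distinct letters).
import Mathlib
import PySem

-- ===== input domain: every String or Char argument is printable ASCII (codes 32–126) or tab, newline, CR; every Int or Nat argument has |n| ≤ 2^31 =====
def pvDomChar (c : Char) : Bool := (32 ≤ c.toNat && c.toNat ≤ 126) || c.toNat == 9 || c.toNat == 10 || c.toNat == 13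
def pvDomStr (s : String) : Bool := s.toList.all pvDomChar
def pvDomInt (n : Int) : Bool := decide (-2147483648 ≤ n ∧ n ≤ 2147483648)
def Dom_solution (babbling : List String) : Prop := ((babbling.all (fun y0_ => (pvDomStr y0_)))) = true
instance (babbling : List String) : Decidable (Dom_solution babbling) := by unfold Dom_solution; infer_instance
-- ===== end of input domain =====

-- B replaces A's enumeration of all 60 token permutations by a single greedy cursor scan
-- of each word with a used-token list (alternative decomposition; correct because the four
-- tokens start with four distinct letters, so the greedy match is forced).

-- ===== PORT A =====
-- itertools.permutations(pool, r) for distinct pool elements, in Python's emission order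
def pvPerms (l : List String) : Nat → List (List String)
  | 0 => [[]]
  | n + 1 => l.flatMap (fun x => (pvPerms (l.erase x) n).map (fun j => x :: j))

def pvMain : List String := ["aya", "ye", "woo", "ma"]

-- the 'words' list A builds: for i in range(1,5): for j in permutations(main,i): words.append(''.join(j))
def pvWords : List String :=
  (PySem.List.pyRange 1 5 1).foldl
    (fun ws i => (pvPerms pvMain i.toNat).foldl (fun ws j => ws ++ [PySem.Str.join "" j]) ws) []

def solution (babbling : List String) : Int :=
  babbling.foldl (fun answer i => if pvWords.contains i then answer + 1 else answer) 0

-- ===== PORT B =====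
def pvTokens : List String := ["aya", "ye", "woo", "ma"]

-- first token not yet used that is a prefix of the remaining characters (the inner for/break)
def pvPick (cs : List Char) (used : List String) : Option String :=
  (pvTokens.filter (fun t => !used.contains t && t.toList.isPrefixOf cs)).head?

-- the while loop; fuel cs.length only makes the recursion structural (each step consumes ≥ 2 chars)
def pvGo : Nat → List Char → List String → List Char × List String
  | 0, cs, used => (cs, used)
  | fuel + 1, cs, used =>
    match pvPick cs used with
    | some t => pvGo fuel (cs.drop t.toList.length) (used ++ [t])
    | none => (cs, used)

def pvAccept (cs : List Char) : Bool :=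
  let r := pvGo cs.length cs []
  r.1.isEmpty && !r.2.isEmpty

def solution_alt (babbling : List String) : Int :=
  babbling.foldl (fun count word => if pvAccept word.toList then count + 1 else count) 0

-- ===== PRECONDITION & SPEC =====
def Spec_solution (babbling : List String) (out : Int) : Prop := out = solution_alt babbling
instance (babbling : List String) (out : Int) : Decidable (Spec_solution babbling out) := by unfold Spec_solution; infer_instance

-- ===== CLAIM (what is proved, stated in full; the proofs are below) =====
def Claim_equal_solution : Prop := ∀ (babbling : List String), Dom_solution babbling → Spec_solution babbling (solution babbling)

-- ===== LEMMAS AND PROOFS =====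

-- completeness: every one of the 60 words A enumerates is accepted by B's greedy scan
theorem accept_of_mem_words : ∀ s ∈ pvWords, pvAccept s.toList = true := by decide

-- every injective sequence of 1..4 tokens joins into pvWords
theorem join_mem_words : ∀ i ∈ [1, 2, 3, 4], ∀ ts ∈ pvPerms pvMain i,
    PySem.Str.join "" ts ∈ pvWords := by decide

-- a Nodup list of elements of l (l Nodup) of length i is emitted by pvPerms l i
theorem mem_perms (ts : List String) : ∀ (l : List String), l.Nodup → ts.Nodup →
    (∀ x ∈ ts, x ∈ l) → ts ∈ pvPerms l ts.length := by
  induction ts with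
  | nil => intro l _ _ _; simp [pvPerms]
  | cons t ts ih =>
    intro l hl hnd hsub
    simp only [List.length_cons, pvPerms, List.mem_flatMap]
    refine ⟨t, hsub t (by simp), ?_⟩
    simp only [List.mem_map]
    refine ⟨ts, ?_, rfl⟩
    refine ih (l.erase t) (hl.erase t) hnd.of_cons ?_
    intro x hx
    rw [hl.mem_erase_iff]
    exact ⟨fun he => (List.nodup_cons.mp hnd).1 (he ▸ hx), hsub x (List.mem_cons_of_mem _ hx)⟩

-- soundness invariant of the greedy loop
theorem go_sound : ∀ (fuel : Nat) (cs : List Char) (used : List String) (rest : List Char) (used' : List String),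
    pvGo fuel cs used = (rest, used') → rest = [] →
    ∃ ts : List String, used' = used ++ ts ∧ (∀ t ∈ ts, t ∈ pvMain) ∧
      (∀ t ∈ ts, t ∉ used) ∧ ts.Nodup ∧ cs = (ts.map String.toList).flatten := by
  intro fuel
  induction fuel with
  | zero =>
    intro cs used rest used' h hrest
    simp only [pvGo, Prod.mk.injEq] at h
    exact ⟨[], by simp [← h.2], by simp, by simp, by simp, by simp [h.1, hrest]⟩
  | succ n ih =>
    intro cs used rest used' h hrest
    simp only [pvGo] at h
    cases hp : pvPick cs used with
    | none =>
      rw [hp] at h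
      simp only [Prod.mk.injEq] at h
      exact ⟨[], by simp [← h.2], by simp, by simp, by simp, by simp [h.1, hrest]⟩
    | some t =>
      rw [hp] at h
      obtain ⟨ts, h1, h2, h3, h4, h5⟩ := ih _ _ _ _ h hrest
      have hmem : t ∈ pvTokens.filter (fun t => !used.contains t && t.toList.isPrefixOf cs) := by
        unfold pvPick at hp
        cases hf : pvTokens.filter (fun t => !used.contains t && t.toList.isPrefixOf cs) with
        | nil => rw [hf] at hp; simp at hp
        | cons a l =>
          rw [hf] at hp
          simp only [List.head?_cons, Option.some.injEq] at hp
          subst hp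
          simp
      have hmem' := List.mem_filter.mp hmem
      have htok : t ∈ pvMain := by
        have h0 := hmem'.1
        simp only [pvTokens] at h0
        simp only [pvMain]
        exact h0
      have hcond := hmem'.2
      simp only [Bool.and_eq_true, Bool.not_eq_true'] at hcond
      have hnu : t ∉ used := by simpa using hcond.1
      have hpre : t.toList <+: cs := List.isPrefixOf_iff_prefix.mp hcond.2
      obtain ⟨u, hu⟩ := hpre
      refine ⟨t :: ts, ?_, ?_, ?_, ?_, ?_⟩
      · simpa using h1
      · intro x hx
        rcases List.mem_cons.mp hx with h' | h'
        · exact h' ▸ htok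
        · exact h2 x h'
      · intro x hx
        rcases List.mem_cons.mp hx with h' | h'
        · exact h' ▸ hnu
        · exact fun hc => h3 x h' (List.mem_append_left _ hc)
      · exact List.nodup_cons.mpr ⟨fun hc => h3 t hc (by simp), h4⟩
      · have hdrop : cs.drop t.toList.length = u := by rw [← hu, List.drop_left]
        rw [hdrop] at h5
        rw [← hu, h5]
        simp

theorem flat_inter : ∀ (xs : List (List Char)), (List.intersperse [] xs).flatten = xs.flatten := by
  intro xs
  induction xs with
  | nil => rfl
  | cons a l ih =>
    cases l with
    | nil => rfl
    | cons b m => simpa using ih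

-- ''.join(ts) on the List Char side
theorem join_eq (ts : List String) : (PySem.Str.join "" ts).toList = (ts.map String.toList).flatten := by
  simp [PySem.Str.join, PySem.Chars.join, List.intercalate, flat_inter]

theorem words_length_le (ts : List String) (h2 : ∀ t ∈ ts, t ∈ pvMain) (h4 : ts.Nodup) :
    ts.length ≤ 4 := by
  simpa [pvMain] using (List.subperm_of_subset h4 h2).length_le

-- the per-string equivalence: membership in A's 60-word list = B's greedy acceptance
theorem contains_eq_accept (s : String) : pvWords.contains s = pvAccept s.toList := by
  by_cases h : s ∈ pvWords
  · rw [accept_of_mem_words s h]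
    simp [h]
  · have hacc : pvAccept s.toList = false := by
      cases hacc : pvAccept s.toList
      · rfl
      · exfalso
        apply h
        rcases hgo : pvGo s.toList.length s.toList [] with ⟨rest, used'⟩
        have hacc' : (rest.isEmpty && !used'.isEmpty) = true := by
          have he : pvAccept s.toList = ((pvGo s.toList.length s.toList []).1.isEmpty
              && !(pvGo s.toList.length s.toList []).2.isEmpty) := rfl
          rw [he, hgo] at hacc
          exact hacc
        simp only [Bool.and_eq_true, List.isEmpty_iff, Bool.not_eq_true',
          List.isEmpty_eq_false_iff] at hacc'
        obtain ⟨ts, h1, h2, h3, h4, h5⟩ := go_sound _ _ _ _ _ hgo hacc'.1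
        rw [List.nil_append] at h1
        have hne : ts ≠ [] := h1 ▸ hacc'.2
        have hlen4 : ts.length ≤ 4 := words_length_le ts h2 h4
        have hlen1 : 1 ≤ ts.length := List.length_pos_iff.mpr hne
        have hmemp := mem_perms ts pvMain (by decide) h4 h2
        have hmemi : ts.length ∈ [1, 2, 3, 4] := by
          simp only [List.mem_cons]
          omega
        have hs : s = PySem.Str.join "" ts := by
          apply String.toList_inj.mp
          rw [join_eq, ← h5]
        exact hs ▸ join_mem_words ts.length hmemi ts hmemp
    simp [hacc, h]

-- both ports fold the same per-word test over babbling
theorem fold_eq : ∀ (l : List String) (a : Int),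
    l.foldl (fun answer i => if pvWords.contains i then answer + 1 else answer) a
      = l.foldl (fun count word => if pvAccept word.toList then count + 1 else count) a := by
  intro l
  induction l with
  | nil => intro a; rfl
  | cons x xs ih =>
    intro a
    simp only [List.foldl_cons, contains_eq_accept]

-- ===== VERDICT (by name: the statement is the Claim_ definition above) =====
theorem solution_spec : Claim_equal_solution := by
  intro babbling _
  unfold Spec_solution solution solution_alt
  exact fold_eq babbling 0
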